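-- pv_equiv track=rewrite | github.com/robcarver17/pysystemtrade | syscore/text.py | sort_dict_by_underscore_length
-- ===== SOURCE A (Python) =====
-- def sort_dict_by_underscore_length(other_args):
--     """
--     Sort dict according to keys and presence of leading underscores
--
--     :param other_args: dict
--     :return: list of dict. First element is dict of all keys with no leading underscores.
--              Second element is dict of all keys with 1 leading underscore...and so on
--     """
--     other_arg_keys = list(other_args.keys())
--     other_arg_keys_sorted = sort_keywords_by_underscore_length(other_arg_keys)
--
--     sorted_list_of_dicts = []
--     for list_of_args in other_arg_keys_sorted:
--         extracted_dict = dict([(key, other_args[key]) for key in list_of_args])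
--         sorted_list_of_dicts.append(extracted_dict)
--
--     return sorted_list_of_dicts
--
-- def sort_keywords_by_underscore_length(other_arg_keys):
--     """
--     Sort other_arg_keys depending on their leading underscores
--
--     Does not strip the underscores!
--
--     :param other_arg_keys: list of str
--     :return: list of list of str. First element is list of all keys with no leading underscores.
--              Second element is list of all keys with 1 leading underscore...and so on
--     """
--
--     counted_keys = dict(
--         [
--             (key_value, count_leading_underscores_in_string(key_value))
--             for key_value in other_arg_keys
--         ]
--     )
--     count_values = list(counted_keys.values())
--     max_key = max(count_values)
--
--     sorted_keywords = []
--     for key_len in range(max_key + 1):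
--         keys_with_key_value = [
--             key for key, key_value in counted_keys.items() if key_value == key_len
--         ]
--         sorted_keywords.append(keys_with_key_value)
--
--     return sorted_keywords
--
-- def count_leading_underscores_in_string(process_string):
--     """
--     How many underscores at start of process string
--
--     :param process_string: str
--     :return: int
--     """
--     if len(process_string) == 0:
--         raise Exception(
--             "Can't pass a parameter name consisting only of underscores or a zero length string"
--         )
--
--     if process_string[0] == "_":
--         return count_leading_underscores_in_string(process_string[1:]) + 1
--
--     return 0
-- ===== SOURCE B (Python) =====
-- def sort_dict_by_underscore_length(other_args):
--     """One-pass bucketing: compute each key's leading-underscore count via lstrip,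
--     then drop every item into its bucket in a single pass (instead of re-scanning
--     all keys once per underscore level)."""
--     counts = {}
--     for key in other_args:
--         stripped = key.lstrip("_")
--         if len(stripped) == 0:
--             raise Exception(
--                 "Can't pass a parameter name consisting only of underscores or a zero length string"
--             )
--         counts[key] = len(key) - len(stripped)
--     top = max(counts.values())
--     buckets = [{} for _ in range(top + 1)]
--     for key, value in other_args.items():
--         buckets[counts[key]][key] = value
--     return buckets
-- ===== Notes on version B (the rewrite author's own statement) =====
-- stated objective: alternative
-- what changed: B computes each key's underscore count once via lstrip and drops every item into its bucket in a single pass, instead of A's per-character recursive counter and one full rescan of all keys per underscore level.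
import Mathlib
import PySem

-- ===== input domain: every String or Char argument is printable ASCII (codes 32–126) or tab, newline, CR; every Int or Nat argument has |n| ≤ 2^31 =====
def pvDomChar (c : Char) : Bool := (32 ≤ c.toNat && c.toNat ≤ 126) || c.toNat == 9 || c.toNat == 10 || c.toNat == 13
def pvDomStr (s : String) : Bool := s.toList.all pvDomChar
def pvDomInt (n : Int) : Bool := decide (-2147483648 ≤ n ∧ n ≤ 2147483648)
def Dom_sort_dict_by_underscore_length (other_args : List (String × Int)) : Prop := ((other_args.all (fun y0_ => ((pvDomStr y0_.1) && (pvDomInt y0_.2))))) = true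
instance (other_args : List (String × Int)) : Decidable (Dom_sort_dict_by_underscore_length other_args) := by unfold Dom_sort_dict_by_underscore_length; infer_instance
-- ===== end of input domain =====

-- B replaces A's per-underscore-level rescans by a single bucketing pass (alternative decomposition).
-- Both Pythons raise on an empty dict and on empty/all-underscore keys; Pre_ excludes exactly those inputs.

-- max(values) of a nonempty list as Python computes it (running max); Python raises ValueError
-- on an empty values list, excluded by Pre_ — the port returns 0 there (used by both ports' max() step)
def pvMaxNat : List Nat → Nat
  | [] => 0
  | x :: t => t.foldl max x

-- ===== PORT A =====
-- count_leading_underscores_in_string; Python raises on "" (excluded by Pre_), the port returns 0 there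
def pvCountLead : List Char → Nat
  | [] => 0
  | c :: rest => if c = '_' then pvCountLead rest + 1 else 0

-- dict(pairs): insert each pair in order (overwrite keeps position), exactly Python's dict()
def pvDictOf (pairs : List (String × Int)) : PySem.Dict String Int :=
  pairs.foldl (fun d p => d.insert p.1 p.2) PySem.Dict.empty

def sort_dict_by_underscore_length (other_args : List (String × Int)) : List (List (String × Int)) :=
  let d := pvDictOf other_args
  let other_arg_keys := d.keys
  -- sort_keywords_by_underscore_length, inlined step for step
  let counted_keys : PySem.Dict String Nat :=
    (other_arg_keys.map (fun k => (k, pvCountLead k.toList))).foldl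
      (fun cd p => cd.insert p.1 p.2) PySem.Dict.empty
  let count_values := counted_keys.values
  -- max(count_values); Python raises ValueError on [] (excluded by Pre_), the port returns 0 there
  let max_key : Nat := pvMaxNat count_values
  let sorted_keywords :=
    (List.range (max_key + 1)).map (fun key_len =>
      (counted_keys.items.filter (fun p => p.2 = key_len)).map Prod.fst)
  sorted_keywords.map (fun list_of_args =>
    ((list_of_args.map (fun key => (key, d.getD key 0))).foldl
      (fun ed p => ed.insert p.1 p.2) (PySem.Dict.empty : PySem.Dict String Int)).items)

-- ===== PORT B =====
-- len(key) - len(key.lstrip('_')); lstrip('_') is dropWhile (= '_'), exact; Python raises when the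
-- stripped key is empty (excluded by Pre_), the port just returns the count
def pvLeadAlt (k : String) : Nat :=
  k.toList.length - (k.toList.dropWhile (fun c => c = '_')).length

def sort_dict_by_underscore_length_alt (other_args : List (String × Int)) : List (List (String × Int)) :=
  let d := pvDictOf other_args
  let counts : PySem.Dict String Nat :=
    d.keys.foldl (fun cd k => cd.insert k (pvLeadAlt k)) PySem.Dict.empty
  -- max(counts.values()); Python raises ValueError on [] (excluded by Pre_), the port returns 0 there
  let top : Nat := pvMaxNat counts.values
  let buckets : List (List (String × Int)) := List.replicate (top + 1) []
  d.items.foldl (fun bs kv => bs.modify (counts.getD kv.1 0) (fun b => b ++ [kv])) buckets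

-- ===== PRECONDITION & SPEC =====
-- Pre_ excludes exactly the inputs where Python A raises: the empty dict (where Python's max() raises ValueError)
-- and any key that is empty or consists only of underscores (explicit Exception).
def Pre_sort_dict_by_underscore_length (other_args : List (String × Int)) : Prop :=
  other_args ≠ [] ∧ ∀ p ∈ other_args, (p.1.toList.any (fun c => c ≠ '_')) = true
instance (other_args : List (String × Int)) : Decidable (Pre_sort_dict_by_underscore_length other_args) := by unfold Pre_sort_dict_by_underscore_length; infer_instance
def pvWitness_sort_dict_by_underscore_length : (List (String × Int)) := [("a", 1), ("__b", 2)]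

def Spec_sort_dict_by_underscore_length (other_args : List (String × Int)) (out : List (List (String × Int))) : Prop := out = sort_dict_by_underscore_length_alt other_args
instance (other_args : List (String × Int)) (out : List (List (String × Int))) : Decidable (Spec_sort_dict_by_underscore_length other_args out) := by unfold Spec_sort_dict_by_underscore_length; infer_instance

-- ===== CLAIM (what is proved, stated in full; the proofs are below) =====
def Claim_equal_sort_dict_by_underscore_length : Prop := ∀ (other_args : List (String × Int)), Dom_sort_dict_by_underscore_length other_args → Pre_sort_dict_by_underscore_length other_args → Spec_sort_dict_by_underscore_length other_args (sort_dict_by_underscore_length other_args)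

-- ===== LEMMAS AND PROOFS =====

-- the two leading-underscore counters agree on every string
theorem lead_eq (l : List Char) : l.length - (l.dropWhile (fun c => c = '_')).length = pvCountLead l := by
  induction l with
  | nil => simp [pvCountLead]
  | cons c rest ih =>
    by_cases h : c = '_'
    · have hle := List.length_dropWhile_le (p := fun c => decide (c = '_')) (l := rest)
      simp [pvCountLead, h, List.dropWhile]
      omega
    · simp [pvCountLead, h, List.dropWhile]

theorem init_le_foldl_max (l : List Nat) (a : Nat) : a ≤ l.foldl max a := by
  induction l generalizing a with
  | nil => exact le_refl a
  | cons y t ih => exact le_trans (le_max_left a y) (ih (max a y))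

theorem le_foldl_max (l : List Nat) (a x : Nat) (hx : x ∈ l) : x ≤ l.foldl max a := by
  induction l generalizing a with
  | nil => cases hx
  | cons y t ih =>
    rcases List.mem_cons.mp hx with rfl | hx
    · exact le_trans (le_max_right a x) (init_le_foldl_max t _)
    · exact ih _ hx

-- the bucketing fold, characterised bucket by bucket
theorem foldl_buckets (cnt : String × Int → Nat) (l : List (String × Int))
    (bs : List (List (String × Int))) (h : ∀ p ∈ l, cnt p < bs.length) (i : Nat) (hi : i < bs.length) :
    (l.foldl (fun bs kv => bs.modify (cnt kv) (fun b => b ++ [kv])) bs)[i]? =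
      some (bs[i] ++ l.filter (fun p => cnt p = i)) := by
  induction l generalizing bs with
  | nil => simp
  | cons kv rest ih =>
    simp only [List.foldl_cons]
    have hlen : (bs.modify (cnt kv) (fun b => b ++ [kv])).length = bs.length := List.length_modify ..
    have h' : ∀ p ∈ rest, cnt p < (bs.modify (cnt kv) (fun b => b ++ [kv])).length := by
      intro p hp; rw [hlen]; exact h p (List.mem_cons_of_mem _ hp)
    rw [ih _ h' (hlen ▸ hi)]
    by_cases hc : cnt kv = i
    · simp [hc]
    · simp [hc]

-- length of the bucketing fold
theorem foldl_buckets_len (cnt : String × Int → Nat) (l : List (String × Int))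
    (bs : List (List (String × Int))) :
    (l.foldl (fun bs kv => bs.modify (cnt kv) (fun b => b ++ [kv])) bs).length = bs.length := by
  induction l generalizing bs with
  | nil => rfl
  | cons kv rest ih => simp only [List.foldl_cons]; rw [ih, List.length_modify]

-- a fold of inserts over fresh distinct keys just lists the pairs
theorem items_insert_fold {ν : Type} (pairs : List (String × ν)) (hnd : (pairs.map Prod.fst).Nodup) :
    ((pairs.foldl (fun cd p => cd.insert p.1 p.2) (PySem.Dict.empty : PySem.Dict String ν))).items
      = pairs := by
  have := PySem.Dict.items_foldl_insert_fresh (l := pairs) (k := Prod.fst) (v := Prod.snd)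
    (d := (PySem.Dict.empty : PySem.Dict String ν))
    (by intro a _; exact PySem.Dict.contains_empty _) hnd
  simpa using this

theorem nodup_keys_pvDictOf (other_args : List (String × Int)) : (pvDictOf other_args).keys.Nodup := by
  unfold pvDictOf
  exact PySem.Dict.nodup_keys_foldl_insert_key other_args Prod.fst (fun d p => p.2) _
    (PySem.Dict.nodup_keys_empty)

theorem mem_le_pvMaxNat (l : List Nat) (x : Nat) (hx : x ∈ l) : x ≤ pvMaxNat l := by
  unfold pvMaxNat
  cases l with
  | nil => cases hx
  | cons y t =>
    rcases List.mem_cons.mp hx with rfl | h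
    · exact init_le_foldl_max t x
    · exact le_foldl_max t y x h

theorem sort_dict_main (other_args : List (String × Int)) :
    sort_dict_by_underscore_length other_args = sort_dict_by_underscore_length_alt other_args := by
  unfold sort_dict_by_underscore_length sort_dict_by_underscore_length_alt
  simp only
  set d := pvDictOf other_args with hd
  have hnd : d.keys.Nodup := nodup_keys_pvDictOf other_args
  have hcnt : ∀ k : String, pvLeadAlt k = pvCountLead k.toList := fun k => lead_eq k.toList
  set countsB := d.keys.foldl (fun cd k => cd.insert k (pvLeadAlt k))
      (PySem.Dict.empty : PySem.Dict String Nat) with hcb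
  set countedA := (d.keys.map (fun k => (k, pvCountLead k.toList))).foldl
      (fun cd p => cd.insert p.1 p.2) (PySem.Dict.empty : PySem.Dict String Nat) with hca
  have hA : countedA.items = d.keys.map (fun k => (k, pvCountLead k.toList)) := by
    rw [hca]; apply items_insert_fold
    simp only [List.map_map, Function.comp_def]
    simpa using hnd
  have hB : countsB.items = d.keys.map (fun k => (k, pvCountLead k.toList)) := by
    have h1 : (d.keys.map (fun k => (k, pvLeadAlt k))).foldl (fun cd p => cd.insert p.1 p.2)
        (PySem.Dict.empty : PySem.Dict String Nat)
        = d.keys.foldl (fun cd k => cd.insert k (pvLeadAlt k)) PySem.Dict.empty := by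
      rw [List.foldl_map]
    rw [hcb, ← h1]
    rw [items_insert_fold]
    · simp only [hcnt]
    · simp only [List.map_map, Function.comp_def]
      simpa using hnd
  -- equal values lists, hence equal maxima
  have hvals : countedA.values = countsB.values := by
    simp only [PySem.Dict.values]; rw [hA, hB]
  rw [← hvals]
  -- B's lookup in counts is pvCountLead
  have hBget : ∀ k ∈ d.keys, countsB.getD k 0 = pvCountLead k.toList := by
    intro k hk
    have hmem : (k, pvCountLead k.toList) ∈ countsB.items := by
      rw [hB]; exact List.mem_map_of_mem hk
    have hndB : countsB.keys.Nodup := by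
      simp only [PySem.Dict.keys]; rw [hB]
      simp only [List.map_map, Function.comp_def]
      simpa using hnd
    exact PySem.Dict.getD_of_mem_items countsB hmem hndB 0
  -- name the shared maximum
  generalize hM : pvMaxNat countedA.values = M
  -- every count is at most M
  have hbound : ∀ p ∈ d.items, pvCountLead p.1.toList < M + 1 := by
    intro p hp
    have hk : p.1 ∈ d.keys := PySem.Dict.mem_keys_of_mem_items d hp
    have hmemv : pvCountLead p.1.toList ∈ countedA.values := by
      simp only [PySem.Dict.values]; rw [hA]
      simp only [List.map_map]
      exact List.mem_map_of_mem (f := (Prod.snd ∘ fun k => (k, pvCountLead k.toList))) hk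
    have hle := mem_le_pvMaxNat countedA.values _ hmemv
    rw [hM] at hle
    omega
  -- items of d as a map over its keys
  have hitems : d.items = d.keys.map (fun k => (k, d.getD k 0)) :=
    PySem.Dict.items_eq_map_keys d hnd 0
  -- compare the two result lists element by element
  apply List.ext_getElem
  · simp [foldl_buckets_len]
  · intro i hiA hiB
    have hiB' : i < M + 1 := by
      have h := hiB; rwa [foldl_buckets_len, List.length_replicate] at h
    have hbound' : ∀ p ∈ d.items,
        (fun kv : String × Int => countsB.getD kv.1 0) p
          < (List.replicate (M + 1) ([] : List (String × Int))).length := by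
      intro p hp
      show countsB.getD p.1 0 < (List.replicate (M + 1) ([] : List (String × Int))).length
      rw [List.length_replicate]
      rw [hBget p.1 (PySem.Dict.mem_keys_of_mem_items d hp)]
      exact hbound p hp
    have hgetB := foldl_buckets (fun kv => countsB.getD kv.1 0) d.items
      (List.replicate (M + 1) []) hbound' i (by rw [List.length_replicate]; exact hiB')
    have hBi : (d.items.foldl (fun bs kv => bs.modify (countsB.getD kv.1 0) (fun b => b ++ [kv]))
        (List.replicate (M + 1) ([] : List (String × Int))))[i]
          = d.items.filter (fun p => countsB.getD p.1 0 = i) := by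
      rw [List.getElem?_eq_getElem hiB] at hgetB
      simp only [List.getElem_replicate] at hgetB
      simpa using hgetB
    rw [hBi]
    -- A side
    rw [List.getElem_map, List.getElem_map, List.getElem_range]
    have hgrp : (countedA.items.filter (fun p => p.2 = i)).map Prod.fst
        = d.keys.filter (fun k => pvCountLead k.toList = i) := by
      rw [hA, List.filter_map]
      simp [Function.comp_def]
    have hgnd : (((countedA.items.filter (fun p => p.2 = i)).map Prod.fst).map
        (fun key => (key, d.getD key 0)) |>.map Prod.fst).Nodup := by
      rw [hgrp]
      simp only [List.map_map, Function.comp_def]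
      simpa using hnd.filter _
    rw [items_insert_fold _ hgnd, hgrp]
    -- both sides are now maps/filters over d.keys
    rw [hitems, List.filter_map]
    have hcong : ∀ k ∈ d.keys, (decide (countsB.getD k 0 = i)) = decide (pvCountLead k.toList = i) := by
      intro k hk; rw [hBget k hk]
    simp only [Function.comp_def]
    rw [List.filter_congr hcong]

-- ===== VERDICT (by name: the statement is the Claim_ definition above) =====
theorem sort_dict_by_underscore_length_spec : Claim_equal_sort_dict_by_underscore_length := by
  intro other_args _ _
  unfold Spec_sort_dict_by_underscore_length
  exact sort_dict_main other_args
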